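-- pv_equiv track=rewrite | github.com/mohammadfaiizan/ProjectI | DSA/Problem/Trie/04_Suffix_Trees_Advanced_Structures/1178_Number_of_Valid_Words_for_Each_Puzzle.py | findNumOfValidWords2
-- ===== SOURCE A (Python) =====
-- from typing import List, Dict, Set
-- from collections import defaultdict, Counter
--
-- def findNumOfValidWords2(words: List[str], puzzles: List[str]) -> List[int]:
--     """
--     Approach 2: Bitmask with Precomputation
--
--     Convert words and puzzles to bitmasks for efficient operations.
--
--     Time: O(W + P * 2^7) where W=words, P=puzzles
--     Space: O(W)
--     """
--     def char_to_bit(c: str) -> int: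
--         """Convert character to bit position"""
--         return ord(c) - ord('a')
--
--     def word_to_mask(word: str) -> int:
--         """Convert word to bitmask"""
--         mask = 0
--         for char in word:
--             mask |= 1 << char_to_bit(char)
--         return mask
--
--     # Precompute word masks and count occurrences
--     word_mask_count = Counter()
--     for word in words:
--         mask = word_to_mask(word)
--         word_mask_count[mask] += 1
--
--     result = []
--
--     for puzzle in puzzles:
--         puzzle_mask = word_to_mask(puzzle)
--         first_bit = 1 << char_to_bit(puzzle[0])
--         count = 0
--
--         # Generate all submasks of puzzle
--         submask = puzzle_mask
--         while submask > 0: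
--             # Check if submask contains first character
--             if submask & first_bit:
--                 count += word_mask_count[submask]
--
--             # Generate next submask
--             submask = (submask - 1) & puzzle_mask
--
--         result.append(count)
--
--     return result
-- ===== SOURCE B (Python) =====
-- from collections import Counter
--
-- def findNumOfValidWords2(words, puzzles):
--     # Same Counter precomputation, but per puzzle scan the stored masks
--     # instead of enumerating submasks of the puzzle mask.
--     mask_count = Counter()
--     for word in words:
--         m = 0
--         for ch in word:
--             m |= 1 << (ord(ch) - ord('a'))
--         mask_count[m] += 1
--
--     result = []
--     for puzzle in puzzles:
--         pm = 0
--         for ch in puzzle: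
--             pm |= 1 << (ord(ch) - ord('a'))
--         fb = 1 << (ord(puzzle[0]) - ord('a'))
--         total = 0
--         for m, c in mask_count.items():
--             if (m & pm) == m and (m & fb):
--                 total += c
--         result.append(total)
--     return result
-- ===== Notes on version B (the rewrite author's own statement) =====
-- stated objective: alternative
-- what changed: Per puzzle, B scans the precomputed Counter's (mask,count) entries testing mask&puzzle_mask==mask and mask&first_bit, instead of enumerating all submasks of the puzzle mask; the Counter precomputation is kept.
import Mathlib
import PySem

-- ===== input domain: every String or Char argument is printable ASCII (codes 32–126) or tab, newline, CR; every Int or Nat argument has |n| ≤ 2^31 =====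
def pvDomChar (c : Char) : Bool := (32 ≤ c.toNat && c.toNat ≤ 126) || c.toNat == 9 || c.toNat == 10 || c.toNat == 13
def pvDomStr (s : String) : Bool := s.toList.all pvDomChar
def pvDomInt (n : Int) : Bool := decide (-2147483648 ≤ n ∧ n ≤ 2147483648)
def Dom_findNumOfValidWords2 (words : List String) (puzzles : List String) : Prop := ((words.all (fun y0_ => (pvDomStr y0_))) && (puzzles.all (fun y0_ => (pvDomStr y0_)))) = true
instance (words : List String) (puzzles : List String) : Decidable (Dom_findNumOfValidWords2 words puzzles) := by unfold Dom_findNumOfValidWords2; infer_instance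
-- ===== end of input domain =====

-- B replaces A's per-puzzle submask enumeration by a direct scan of the Counter's
-- (mask, count) entries; same Counter precomputation, same results (objective: alternative).

-- ===== PORT A =====
-- char_to_bit / word_to_mask; exact on Pre_ (every character ≥ 'a', so ord(c)-97 never underflows)
def charToBit (c : Char) : Nat := c.toNat - 97

def wordToMask (w : String) : Nat :=
  w.toList.foldl (fun mask ch => mask ||| (1 <<< charToBit ch)) 0

-- the `while submask > 0` loop of A, carrying `count`
def submaskLoop (d : PySem.Dict Nat Int) (pm fb : Nat) (submask : Nat) (count : Int) : Int :=
  if _h : 0 < submask then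
    submaskLoop d pm fb ((submask - 1) &&& pm)
      (if submask &&& fb ≠ 0 then count + d.getD submask 0 else count)
  else count
termination_by submask
decreasing_by exact Nat.lt_of_le_of_lt (Nat.and_le_left) (Nat.sub_lt _h Nat.one_pos)

def findNumOfValidWords2 (words : List String) (puzzles : List String) : List Int :=
  let wordMaskCount :=
    words.foldl (fun d word => d.modify (wordToMask word) 0 (· + 1)) PySem.Dict.empty
  puzzles.foldl (fun result puzzle =>
    let puzzleMask := wordToMask puzzle
    let firstBit := match puzzle.toList with
      | c :: _ => 1 <<< charToBit c
      | [] => 0   -- puzzle[0] raises IndexError in Python; excluded by Pre_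
    result ++ [submaskLoop wordMaskCount puzzleMask firstBit puzzleMask 0]) []

-- ===== PORT B =====
def maskOf (w : String) : Nat :=
  w.toList.foldl (fun m ch => m ||| (1 <<< (ch.toNat - 97))) 0

def findNumOfValidWords2_alt (words : List String) (puzzles : List String) : List Int :=
  let maskCount :=
    words.foldl (fun d word => d.modify (maskOf word) 0 (· + 1)) PySem.Dict.empty
  puzzles.foldl (fun result puzzle =>
    let pm := maskOf puzzle
    let fb := match puzzle.toList with
      | c :: _ => 1 <<< (c.toNat - 97)
      | [] => 0   -- puzzle[0] raises IndexError in Python; excluded by Pre_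
    result ++ [maskCount.items.foldl
      (fun total mc => if (mc.1 &&& pm == mc.1) && (mc.1 &&& fb != 0) then total + mc.2 else total) 0]) []

-- ===== PRECONDITION & SPEC =====
-- Pre_ excludes exactly the inputs where Python A raises: a character below 'a' in any word or
-- puzzle makes `1 << (ord(c) - ord('a'))` a negative shift (ValueError), and an empty puzzle
-- makes `puzzle[0]` an IndexError.  (B raises in the same places.)
def Pre_findNumOfValidWords2 (words : List String) (puzzles : List String) : Prop :=
  (words.all (fun w => w.toList.all (fun c => 97 ≤ c.toNat)) &&
   puzzles.all (fun p => !p.toList.isEmpty && p.toList.all (fun c => 97 ≤ c.toNat))) = true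
instance (words : List String) (puzzles : List String) : Decidable (Pre_findNumOfValidWords2 words puzzles) := by
  unfold Pre_findNumOfValidWords2; infer_instance

def pvWitness_findNumOfValidWords2 : List String × List String := (["apple", "pleas"], ["aelwp"])

def Spec_findNumOfValidWords2 (words : List String) (puzzles : List String) (out : List Int) : Prop := out = findNumOfValidWords2_alt words puzzles
instance (words : List String) (puzzles : List String) (out : List Int) : Decidable (Spec_findNumOfValidWords2 words puzzles out) := by unfold Spec_findNumOfValidWords2; infer_instance

-- ===== CLAIM (what is proved, stated in full; the proofs are below) =====
def Claim_equal_findNumOfValidWords2 : Prop := ∀ (words : List String) (puzzles : List String), Dom_findNumOfValidWords2 words puzzles → Pre_findNumOfValidWords2 words puzzles → Spec_findNumOfValidWords2 words puzzles (findNumOfValidWords2 words puzzles)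

-- ===== LEMMAS AND PROOFS =====

-- binary split of &&& into low bit and the rest
theorem and_split (a b : Nat) : a &&& b = 2 * (a / 2 &&& b / 2) + a % 2 * (b % 2) := by
  conv_lhs => rw [← Nat.bit_bodd_div2 a, ← Nat.bit_bodd_div2 b]
  rw [Nat.land_bit, Nat.bit_val, Nat.div2_val, Nat.div2_val]
  cases ha : a.bodd <;> cases hb : b.bodd <;> simp [Nat.mod_two_of_bodd, ha, hb]

-- the submask-enumeration step: any submask t < s of pm satisfies t ≤ (s-1) &&& pm
theorem sub_one_and_le (s : Nat) : ∀ pm t : Nat, s &&& pm = s → t &&& pm = t → t < s →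
    t ≤ (s - 1) &&& pm := by
  induction s using Nat.strong_induction_on with
  | _ s ih =>
    intro pm t hs ht hlt
    have hS := and_split s pm
    have hT := and_split t pm
    have hS1 := and_split (s - 1) pm
    rw [hs] at hS; rw [ht] at hT
    rcases Nat.mod_two_eq_zero_or_one s with hse | hso
    · have h1 : (s - 1) / 2 = s / 2 - 1 := by omega
      have h2 : (s - 1) % 2 = 1 := by omega
      rw [h1, h2] at hS1
      have hs2 : s / 2 &&& pm / 2 = s / 2 := by
        rw [hse] at hS; simp at hS; omega
      have ht2 : t / 2 &&& pm / 2 = t / 2 ∧ t % 2 ≤ pm % 2 := by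
        rcases Nat.mod_two_eq_zero_or_one t with ht' | ht' <;>
          rcases Nat.mod_two_eq_zero_or_one pm with hp' | hp' <;>
          rw [ht', hp'] at hT <;> simp at hT <;> omega
      have hih : t / 2 ≤ (s / 2 - 1) &&& pm / 2 :=
        ih (s / 2) (by omega) (pm / 2) (t / 2) hs2 ht2.1 (by omega)
      omega
    · have h1 : (s - 1) / 2 = s / 2 := by omega
      have h2 : (s - 1) % 2 = 0 := by omega
      rw [h1, h2] at hS1
      rcases Nat.mod_two_eq_zero_or_one pm with hp' | hp' <;> rw [hso, hp'] at hS <;> omega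

-- the values visited by A's submask loop
def chain (pm : Nat) (s : Nat) : List Nat :=
  if _h : 0 < s then s :: chain pm ((s - 1) &&& pm) else []
termination_by s
decreasing_by exact Nat.lt_of_le_of_lt (Nat.and_le_left) (Nat.sub_lt _h Nat.one_pos)

theorem mem_chain (s : Nat) : ∀ pm t : Nat, s &&& pm = s →
    (t ∈ chain pm s ↔ t &&& pm = t ∧ 0 < t ∧ t ≤ s) := by
  induction s using Nat.strong_induction_on with
  | _ s ih =>
    intro pm t hs
    rw [chain]
    by_cases h0 : 0 < s
    · have hsub : ((s - 1) &&& pm) &&& pm = (s - 1) &&& pm := by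
        rw [Nat.and_assoc, Nat.and_self]
      have hltc : (s - 1) &&& pm < s :=
        Nat.lt_of_le_of_lt (Nat.and_le_left) (Nat.sub_lt h0 Nat.one_pos)
      have hle : (s - 1) &&& pm ≤ s - 1 := Nat.and_le_left
      simp only [dif_pos h0, List.mem_cons, ih ((s - 1) &&& pm) hltc pm t hsub]
      constructor
      · rintro (rfl | ⟨h1, h2, h3⟩)
        · exact ⟨hs, h0, le_refl _⟩
        · exact ⟨h1, h2, by omega⟩
      · rintro ⟨h1, h2, h3⟩
        by_cases ht : t = s
        · exact Or.inl ht
        · exact Or.inr ⟨h1, h2, sub_one_and_le s pm t hs h1 (by omega)⟩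
    · simp only [dif_neg h0, List.not_mem_nil, false_iff]
      rintro ⟨h1, h2, h3⟩; omega

theorem chain_nodup (s : Nat) : ∀ pm : Nat, s &&& pm = s → (chain pm s).Nodup := by
  induction s using Nat.strong_induction_on with
  | _ s ih =>
    intro pm hs
    rw [chain]
    by_cases h0 : 0 < s
    · have hsub : ((s - 1) &&& pm) &&& pm = (s - 1) &&& pm := by
        rw [Nat.and_assoc, Nat.and_self]
      have hltc : (s - 1) &&& pm < s :=
        Nat.lt_of_le_of_lt (Nat.and_le_left) (Nat.sub_lt h0 Nat.one_pos)
      simp only [dif_pos h0, List.nodup_cons]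
      refine ⟨fun hmem => ?_, ih _ hltc pm hsub⟩
      have := (mem_chain _ pm s hsub).mp hmem
      have hle : (s - 1) &&& pm ≤ s - 1 := Nat.and_le_left
      omega
    · simp [dif_neg h0]

theorem submaskLoop_eq_sum (s : Nat) : ∀ (d : PySem.Dict Nat Int) (pm fb : Nat) (c : Int),
    submaskLoop d pm fb s c =
      c + ((chain pm s).map (fun t => if t &&& fb ≠ 0 then d.getD t 0 else 0)).sum := by
  induction s using Nat.strong_induction_on with
  | _ s ih =>
    intro d pm fb c
    rw [submaskLoop, chain]
    by_cases h0 : 0 < s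
    · have hltc : (s - 1) &&& pm < s :=
        Nat.lt_of_le_of_lt (Nat.and_le_left) (Nat.sub_lt h0 Nat.one_pos)
      simp only [dif_pos h0, List.map_cons, List.sum_cons, ih _ hltc]
      by_cases hb : s &&& fb ≠ 0 <;> simp [hb] <;> ring
    · simp [dif_neg h0]

theorem getD_mk_nil (t : Nat) : (PySem.Dict.mk ([] : List (Nat × Int))).getD t 0 = 0 := rfl

theorem getD_mk_cons (m t : Nat) (c : Int) (l : List (Nat × Int)) :
    (PySem.Dict.mk ((m, c) :: l)).getD t 0 = if t = m then c else (PySem.Dict.mk l).getD t 0 := by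
  rw [PySem.Dict.getD_eq_get?_getD, PySem.Dict.get?_mk_cons]
  by_cases h : t = m
  · simp [h]
  · simp [h, Ne.symm h, PySem.Dict.getD_eq_get?_getD]

theorem getD_mk_zero (l : List (Nat × Int)) (m : Nat) (h : m ∉ l.map Prod.fst) :
    (PySem.Dict.mk l).getD m 0 = 0 := by
  apply PySem.Dict.getD_of_not_contains
  rw [PySem.Dict.contains_eq_decide_mem_keys]
  simp [PySem.Dict.keys_mk]
  exact fun x hx => h (List.mem_map_of_mem hx)

theorem sum_map_add (S : List Nat) (f g : Nat → Int) :
    (S.map (fun t => f t + g t)).sum = (S.map f).sum + (S.map g).sum := by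
  induction S with
  | nil => simp
  | cons x xs ih => simp [ih]; ring

theorem sum_ite_eq' (S : List Nat) (m : Nat) (v : Int) (hS : S.Nodup) :
    (S.map (fun t => if t = m then v else 0)).sum = if m ∈ S then v else 0 := by
  induction S with
  | nil => simp
  | cons x xs ih =>
    rcases List.nodup_cons.mp hS with ⟨hx, hxs⟩
    by_cases h : x = m
    · subst h
      simp [ih hxs, hx]
    · simp only [List.map_cons, List.sum_cons, if_neg h, ih hxs, List.mem_cons]
      simp [Ne.symm h]

-- exchange the sum over the visited masks for a sum over the dictionary's entries
theorem exchange (l : List (Nat × Int)) : ∀ (S : List Nat) (P : Nat → Prop) [DecidablePred P],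
    S.Nodup → (l.map Prod.fst).Nodup →
    (S.map (fun t => if P t then (PySem.Dict.mk l).getD t 0 else 0)).sum
      = (l.map (fun mc => if mc.1 ∈ S ∧ P mc.1 then mc.2 else 0)).sum := by
  induction l with
  | nil => intro S P _ _ _; simp [getD_mk_nil]
  | cons hd tl ih =>
    intro S P _ hS hkeys
    obtain ⟨m, c⟩ := hd
    simp only [List.map_cons] at hkeys
    rcases List.nodup_cons.mp hkeys with ⟨hm, htl⟩
    have hpt : (S.map (fun t => if P t then (PySem.Dict.mk ((m, c) :: tl)).getD t 0 else 0))
        = S.map (fun t => (if t = m then (if P m then c else 0) else 0)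
            + (if P t then (PySem.Dict.mk tl).getD t 0 else 0)) := by
      apply List.map_congr_left
      intro t _
      rw [getD_mk_cons]
      by_cases h1 : t = m
      · subst h1
        by_cases h2 : P t <;> simp [h2, getD_mk_zero tl t hm]
      · simp [h1]
    rw [hpt, sum_map_add, sum_ite_eq' S m _ hS, ih S P hS htl]
    simp only [List.map_cons, List.sum_cons]
    by_cases h3 : m ∈ S <;> by_cases h4 : P m <;> simp [h3, h4]

theorem foldl_cond_add (l : List (Nat × Int)) (cond : Nat × Int → Bool) : ∀ acc : Int,
    l.foldl (fun total mc => if cond mc then total + mc.2 else total) acc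
      = acc + (l.map (fun mc => if cond mc then mc.2 else 0)).sum := by
  induction l with
  | nil => intro acc; simp
  | cons x xs ih => intro acc; by_cases h : cond x <;> simp [h, ih, add_assoc]

-- per-puzzle agreement of the two passes
theorem perPuzzle (d : PySem.Dict Nat Int) (pm fb : Nat) (hkeys : d.keys.Nodup) :
    submaskLoop d pm fb pm 0 =
      d.items.foldl (fun total mc => if (mc.1 &&& pm == mc.1) && (mc.1 &&& fb != 0) then total + mc.2 else total) 0 := by
  have hself : pm &&& pm = pm := Nat.and_self pm
  rw [submaskLoop_eq_sum pm d pm fb 0, foldl_cond_add]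
  have hnodS : (chain pm pm).Nodup := chain_nodup pm pm hself
  have hkeys' : (d.items.map Prod.fst).Nodup := hkeys
  have hx := exchange d.items (chain pm pm) (fun t => t &&& fb ≠ 0) hnodS hkeys'
  simp only [zero_add]
  rw [hx]
  apply congrArg List.sum
  apply List.map_congr_left
  intro mc _
  have hiff := mem_chain pm pm mc.1 hself
  by_cases h1 : mc.1 &&& pm = mc.1 <;> by_cases h2 : mc.1 &&& fb = 0
  · simp [hiff, h1, h2]
  · have hpos : 0 < mc.1 := Nat.pos_of_ne_zero (fun h => h2 (h ▸ Nat.zero_and fb))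
    have hle : mc.1 ≤ pm := h1 ▸ Nat.and_le_right
    simp [hiff, h1, h2, hpos, hle]
  · simp [hiff, h1, h2]
  · simp [hiff, h1, h2]

theorem foldl_append_congr (L : List String) (f g : String → Int) (h : ∀ p, f p = g p) :
    ∀ acc : List Int,
      L.foldl (fun r p => r ++ [f p]) acc = L.foldl (fun r p => r ++ [g p]) acc := by
  induction L with
  | nil => intro acc; rfl
  | cons x xs ih =>
    intro acc
    simp only [List.foldl_cons, h x]
    exact ih _

-- ===== VERDICT (by name: the statement is the Claim_ definition above) =====
theorem findNumOfValidWords2_spec : Claim_equal_findNumOfValidWords2 := by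
  intro words puzzles _ _
  show findNumOfValidWords2 words puzzles = findNumOfValidWords2_alt words puzzles
  unfold findNumOfValidWords2 findNumOfValidWords2_alt
  have hkeys : ((words.foldl (fun d word => d.modify (wordToMask word) 0 (· + 1))
      PySem.Dict.empty) : PySem.Dict Nat Int).keys.Nodup :=
    PySem.Dict.nodup_keys_foldl_modify_key words wordToMask 0 (fun _ _ => (· + 1)) PySem.Dict.empty PySem.Dict.nodup_keys_empty
  exact foldl_append_congr puzzles _ _
    (fun p => perPuzzle _ (wordToMask p)
      (match p.toList with
        | c :: _ => 1 <<< charToBit c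
        | [] => 0) hkeys) []
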